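-- pv_equiv track=rewrite | github.com/fisher75/STWM | code/stwm/tools/run_stage2_v3p1_evidence_hardening_20260420.py | _panel_subset_counts
-- ===== SOURCE A (Python) =====
-- from typing import Any, Dict, List, Tuple
--
-- def _panel_subset_counts(per_item: List[Dict[str, Any]]) -> Dict[str, int]:
--     counts = {
--         "full_identifiability_panel": int(len(per_item)),
--         "occlusion_reappearance": 0,
--         "crossing_ambiguity": 0,
--         "small_object": 0,
--         "appearance_change": 0,
--         "long_gap_persistence": 0,
--     }
--     for item in per_item:
--         tags = set(str(x) for x in item.get("subset_tags", []))
--         if "occlusion_reappearance" in tags: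
--             counts["occlusion_reappearance"] += 1
--         if "crossing_ambiguity" in tags:
--             counts["crossing_ambiguity"] += 1
--         if "small_object" in tags:
--             counts["small_object"] += 1
--         if "appearance_change" in tags:
--             counts["appearance_change"] += 1
--         if "long_gap_persistence" in tags:
--             counts["long_gap_persistence"] += 1
--     return counts
-- ===== SOURCE B (Python) =====
-- from typing import Any, Dict, List
--
-- def _panel_subset_counts(per_item: List[Dict[str, Any]]) -> Dict[str, int]:
--     # Build a frequency table of ALL tags (deduplicated per item) in one pass,
--     # then extract the five panel keys from the table.
--     table: Dict[str, int] = {}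
--     for item in per_item:
--         for t in dict.fromkeys(str(x) for x in item.get("subset_tags", [])):
--             table[t] = table.get(t, 0) + 1
--     return {
--         "full_identifiability_panel": len(per_item),
--         "occlusion_reappearance": table.get("occlusion_reappearance", 0),
--         "crossing_ambiguity": table.get("crossing_ambiguity", 0),
--         "small_object": table.get("small_object", 0),
--         "appearance_change": table.get("appearance_change", 0),
--         "long_gap_persistence": table.get("long_gap_persistence", 0),
--     }
-- ===== Notes on version B (the rewrite author's own statement) =====
-- stated objective: idiomatic
-- what changed: Replaces the five fixed membership tests per item by a single-pass tag-frequency table (dict accumulation over each item's deduplicated tags) followed by a fixed extraction of the six result keys.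
import Mathlib
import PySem

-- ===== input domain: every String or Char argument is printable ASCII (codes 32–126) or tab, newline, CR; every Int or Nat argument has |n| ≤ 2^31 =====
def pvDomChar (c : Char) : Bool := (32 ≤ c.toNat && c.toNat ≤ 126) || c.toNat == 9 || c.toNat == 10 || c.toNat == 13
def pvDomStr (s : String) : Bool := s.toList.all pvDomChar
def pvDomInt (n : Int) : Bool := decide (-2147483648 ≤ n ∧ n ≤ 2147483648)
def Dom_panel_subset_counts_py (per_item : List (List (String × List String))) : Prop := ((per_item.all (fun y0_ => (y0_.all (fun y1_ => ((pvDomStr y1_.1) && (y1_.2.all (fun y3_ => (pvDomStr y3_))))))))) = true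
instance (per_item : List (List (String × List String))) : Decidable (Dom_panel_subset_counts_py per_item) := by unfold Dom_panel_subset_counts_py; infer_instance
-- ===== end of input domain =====

-- B replaces A's five fixed per-item membership tests by a one-pass tag-frequency table
-- followed by a fixed extraction of the six result keys (idiomatic; same cost).


-- ===== PORT A =====
-- tags = set(str(x) for x in item.get("subset_tags", []))  (str(x) is the identity on strings)
def pvTags (item : List (String × List String)) : PySem.Set String :=
  PySem.Set.ofList ((PySem.Dict.mk item).getD "subset_tags" [])

-- one 'if key in tags: counts[key] += 1' branch of A (key is always a key of counts,
-- so counts[key] reads back what counts holds: counts.getD key 0)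
def pvBump (counts : PySem.Dict String Int) (tags : PySem.Set String) (key : String) :
    PySem.Dict String Int :=
  if key ∈ tags then counts.insert key (counts.getD key 0 + 1) else counts

-- the body of A's for-loop: the five fixed membership tests, in A's order
def pvStepA (counts : PySem.Dict String Int) (item : List (String × List String)) :
    PySem.Dict String Int :=
  let tags := pvTags item
  pvBump (pvBump (pvBump (pvBump (pvBump counts tags "occlusion_reappearance")
    tags "crossing_ambiguity") tags "small_object") tags "appearance_change")
    tags "long_gap_persistence"

def panel_subset_counts_py (per_item : List (List (String × List String))) : List (String × Int) :=
  let counts : PySem.Dict String Int :=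
    (((((PySem.Dict.empty.insert "full_identifiability_panel" (per_item.length : Int)).insert
      "occlusion_reappearance" 0).insert "crossing_ambiguity" 0).insert
      "small_object" 0).insert "appearance_change" 0).insert "long_gap_persistence" 0
  (per_item.foldl pvStepA counts).items

-- ===== PORT B =====
-- B's inner loop: table[t] = table.get(t, 0) + 1 over dict.fromkeys(…) (ordered dedup)
def pvTally (table : PySem.Dict String Int) (item : List (String × List String)) :
    PySem.Dict String Int :=
  (PySem.List.dedup ((PySem.Dict.mk item).getD "subset_tags" [])).foldl
    (fun t tag => t.modify tag 0 (· + 1)) table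

-- B's returned dict literal: six distinct keys, so its items list is this literal list
def panel_subset_counts_py_alt (per_item : List (List (String × List String))) :
    List (String × Int) :=
  let table := per_item.foldl pvTally PySem.Dict.empty
  [("full_identifiability_panel", (per_item.length : Int)),
   ("occlusion_reappearance", table.getD "occlusion_reappearance" 0),
   ("crossing_ambiguity", table.getD "crossing_ambiguity" 0),
   ("small_object", table.getD "small_object" 0),
   ("appearance_change", table.getD "appearance_change" 0),
   ("long_gap_persistence", table.getD "long_gap_persistence" 0)]

-- ===== PRECONDITION & SPEC =====
def Spec_panel_subset_counts_py (per_item : List (List (String × List String))) (out : List (String × Int)) : Prop := out = panel_subset_counts_py_alt per_item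
instance (per_item : List (List (String × List String))) (out : List (String × Int)) : Decidable (Spec_panel_subset_counts_py per_item out) := by unfold Spec_panel_subset_counts_py; infer_instance

-- ===== CLAIM (what is proved, stated in full; the proofs are below) =====
def Claim_equal_panel_subset_counts_py : Prop := ∀ (per_item : List (List (String × List String))), Dom_panel_subset_counts_py per_item → Spec_panel_subset_counts_py per_item (panel_subset_counts_py per_item)

-- ===== LEMMAS AND PROOFS =====

def pvFiveKeys : List String :=
  ["occlusion_reappearance", "crossing_ambiguity", "small_object",
   "appearance_change", "long_gap_persistence"]

def pvAllKeys : List String := "full_identifiability_panel" :: pvFiveKeys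

def pvInit (n : Int) : PySem.Dict String Int :=
  (((((PySem.Dict.empty.insert "full_identifiability_panel" n).insert
    "occlusion_reappearance" 0).insert "crossing_ambiguity" 0).insert
    "small_object" 0).insert "appearance_change" 0).insert "long_gap_persistence" 0

-- per-item 0/1 indicator: does the item's tag set contain k?
def pvInd (k : String) (item : List (String × List String)) : Int :=
  if k ∈ pvTags item then 1 else 0

lemma pvBump_getD (d : PySem.Dict String Int) (tags : PySem.Set String) (key k : String) :
    (pvBump d tags key).getD k 0 = d.getD k 0 + (if k = key ∧ key ∈ tags then 1 else 0) := by
  unfold pvBump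
  by_cases hm : key ∈ tags
  · by_cases hk : k = key
    · subst hk; simp [hm, PySem.Dict.getD_insert_self]
    · simp [hm, hk, PySem.Dict.getD_insert_of_ne _ _ _ hk]
  · simp [hm]

lemma pvStepA_getD (d : PySem.Dict String Int) (item : List (String × List String)) (k : String) :
    (pvStepA d item).getD k 0
      = d.getD k 0 + (if k ∈ pvFiveKeys ∧ k ∈ pvTags item then 1 else 0) := by
  unfold pvStepA
  simp only [pvBump_getD]
  by_cases h1 : k = "occlusion_reappearance"
  · subst h1; simp [pvFiveKeys]
  by_cases h2 : k = "crossing_ambiguity"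
  · subst h2; simp [pvFiveKeys]
  by_cases h3 : k = "small_object"
  · subst h3; simp [pvFiveKeys]
  by_cases h4 : k = "appearance_change"
  · subst h4; simp [pvFiveKeys]
  by_cases h5 : k = "long_gap_persistence"
  · subst h5; simp [pvFiveKeys]
  simp [pvFiveKeys, h1, h2, h3, h4, h5]

lemma pvFold_getD (step : PySem.Dict String Int → List (String × List String) → PySem.Dict String Int)
    (f : List (String × List String) → Int) (k : String)
    (h : ∀ d item, (step d item).getD k 0 = d.getD k 0 + f item) :
    ∀ (l : List (List (String × List String))) (d : PySem.Dict String Int),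
      (l.foldl step d).getD k 0 = d.getD k 0 + (l.map f).sum := by
  intro l
  induction l with
  | nil => intro d; simp
  | cons x xs ih => intro d; simp only [List.foldl_cons, ih, h, List.map_cons, List.sum_cons]; ring

lemma pvTally_getD (d : PySem.Dict String Int) (item : List (String × List String)) (k : String) :
    (pvTally d item).getD k 0 = d.getD k 0 + pvInd k item := by
  unfold pvTally pvInd pvTags
  rw [PySem.Dict.getD_foldl_modify_add_one, PySem.List.dedup_eq_ofList]
  congr 1
  by_cases hm : k ∈ PySem.Set.ofList ((PySem.Dict.mk item).getD "subset_tags" [])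
  · rw [List.count_eq_one_of_mem (PySem.Set.nodup_ofList _) hm]
    simp [hm]
  · rw [List.count_eq_zero.mpr hm]
    simp [hm]

lemma pvBump_keys (d : PySem.Dict String Int) (tags : PySem.Set String) (key : String)
    (hk : key ∈ pvAllKeys) (h : d.keys = pvAllKeys) : (pvBump d tags key).keys = pvAllKeys := by
  unfold pvBump
  split
  · rw [PySem.Dict.keys_insert_of_contains d _
      ((PySem.Dict.contains_iff_mem_keys d key).mpr (h ▸ hk))]
    exact h
  · exact h

lemma pvStepA_keys (d : PySem.Dict String Int) (item : List (String × List String))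
    (h : d.keys = pvAllKeys) : (pvStepA d item).keys = pvAllKeys := by
  unfold pvStepA
  exact pvBump_keys _ _ _ (by decide)
    (pvBump_keys _ _ _ (by decide)
      (pvBump_keys _ _ _ (by decide)
        (pvBump_keys _ _ _ (by decide)
          (pvBump_keys _ _ _ (by decide) h))))

lemma pvFoldA_keys : ∀ (l : List (List (String × List String))) (d : PySem.Dict String Int),
    d.keys = pvAllKeys → (l.foldl pvStepA d).keys = pvAllKeys := by
  intro l
  induction l with
  | nil => intro d h; exact h
  | cons x xs ih => intro d h; exact ih _ (pvStepA_keys _ _ h)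

lemma pvInit_keys (n : Int) : (pvInit n).keys = pvAllKeys := by
  unfold pvInit
  rw [PySem.Dict.keys_insert_of_not_contains, PySem.Dict.keys_insert_of_not_contains,
      PySem.Dict.keys_insert_of_not_contains, PySem.Dict.keys_insert_of_not_contains,
      PySem.Dict.keys_insert_of_not_contains, PySem.Dict.keys_insert_of_not_contains] <;>
    simp [PySem.Dict.contains_insert, pvAllKeys, pvFiveKeys]

lemma pvInit_getD_head (n : Int) : (pvInit n).getD "full_identifiability_panel" 0 = n := by
  unfold pvInit
  rw [PySem.Dict.getD_insert_of_ne _ _ _ (by decide), PySem.Dict.getD_insert_of_ne _ _ _ (by decide),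
      PySem.Dict.getD_insert_of_ne _ _ _ (by decide), PySem.Dict.getD_insert_of_ne _ _ _ (by decide),
      PySem.Dict.getD_insert_of_ne _ _ _ (by decide), PySem.Dict.getD_insert_self]

lemma pvInit_getD_five (n : Int) (k : String) (hk : k ∈ pvFiveKeys) : (pvInit n).getD k 0 = 0 := by
  unfold pvInit
  fin_cases hk
  · rw [PySem.Dict.getD_insert_of_ne _ _ _ (by decide), PySem.Dict.getD_insert_of_ne _ _ _ (by decide),
        PySem.Dict.getD_insert_of_ne _ _ _ (by decide), PySem.Dict.getD_insert_of_ne _ _ _ (by decide),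
        PySem.Dict.getD_insert_self]
  · rw [PySem.Dict.getD_insert_of_ne _ _ _ (by decide), PySem.Dict.getD_insert_of_ne _ _ _ (by decide),
        PySem.Dict.getD_insert_of_ne _ _ _ (by decide), PySem.Dict.getD_insert_self]
  · rw [PySem.Dict.getD_insert_of_ne _ _ _ (by decide), PySem.Dict.getD_insert_of_ne _ _ _ (by decide),
        PySem.Dict.getD_insert_self]
  · rw [PySem.Dict.getD_insert_of_ne _ _ _ (by decide), PySem.Dict.getD_insert_self]
  · rw [PySem.Dict.getD_insert_self]

lemma pvFoldA_getD_five (l : List (List (String × List String))) (d : PySem.Dict String Int)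
    (k : String) (hk : k ∈ pvFiveKeys) :
    (l.foldl pvStepA d).getD k 0 = d.getD k 0 + (l.map (pvInd k)).sum := by
  rw [pvFold_getD pvStepA (pvInd k) k (fun d item => by rw [pvStepA_getD]; unfold pvInd; simp [hk])]

lemma pvFoldB_getD (l : List (List (String × List String))) (k : String) :
    (l.foldl pvTally PySem.Dict.empty).getD k 0 = (l.map (pvInd k)).sum := by
  rw [pvFold_getD pvTally (pvInd k) k (fun d item => pvTally_getD d item k), PySem.Dict.getD_empty]
  ring

-- ===== VERDICT (by name: the statement is the Claim_ definition above) =====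
theorem panel_subset_counts_py_spec : Claim_equal_panel_subset_counts_py := by
  intro per_item _hdom
  unfold Spec_panel_subset_counts_py
  have hA : panel_subset_counts_py per_item
      = (per_item.foldl pvStepA (pvInit (per_item.length : Int))).items := rfl
  have hkeys : (per_item.foldl pvStepA (pvInit (per_item.length : Int))).keys = pvAllKeys :=
    pvFoldA_keys _ _ (pvInit_keys _)
  have hnd : (per_item.foldl pvStepA (pvInit (per_item.length : Int))).keys.Nodup := by
    rw [hkeys]; decide
  rw [hA, PySem.Dict.items_eq_map_keys _ hnd 0, hkeys]
  have h0 : (per_item.foldl pvStepA (pvInit (per_item.length : Int))).getD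
      "full_identifiability_panel" 0 = (per_item.length : Int) := by
    rw [pvFold_getD pvStepA (fun _ => 0) _
        (fun d item => by rw [pvStepA_getD]; simp [pvFiveKeys]), pvInit_getD_head]
    simp
  have h5 : ∀ k ∈ pvFiveKeys,
      (per_item.foldl pvStepA (pvInit (per_item.length : Int))).getD k 0
        = (per_item.map (pvInd k)).sum := by
    intro k hk
    rw [pvFoldA_getD_five _ _ _ hk, pvInit_getD_five _ _ hk]
    ring
  simp only [pvAllKeys, pvFiveKeys, List.map_cons, List.map_nil]
  rw [h0, h5 _ (by decide), h5 _ (by decide), h5 _ (by decide), h5 _ (by decide), h5 _ (by decide)]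
  simp only [panel_subset_counts_py_alt, pvFoldB_getD]
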